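-- pv_equiv track=rewrite | github.com/7i6ht/math2visual | backend/app/services/visual_generation/dsl_parser.py | update_container_types_optimized
-- ===== SOURCE A (Python) =====
-- from typing import Dict, List, Any, Optional, Tuple
-- from collections import defaultdict
--
-- def update_container_types_optimized(entities: List[Dict[str, Any]],
--                                    result_entities: List[Dict[str, Any]]) -> Tuple[List[Dict[str, Any]], List[Dict[str, Any]]]:
--     """Update container types to ensure uniqueness."""
--     combined = entities[:]
--     if result_entities:
--         combined.append(result_entities[-1])
--
--     entity_type_to_entities = defaultdict(list)
--     for entity in combined:
--         entity_type_to_entities[entity['container_type']].append(entity)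
--
--     for container_type, group in entity_type_to_entities.items():
--         name_to_entities = defaultdict(list)
--         for entity in group:
--             name_to_entities[entity['container_name']].append(entity)
--
--         if len(name_to_entities) <= 1:
--             continue
--
--         modification_index = 1
--         for name, ent_group in name_to_entities.items():
--             if modification_index == 1:
--                 new_entity_type = container_type
--             else:
--                 new_entity_type = f"{container_type}-{modification_index}"
--
--             for entity in ent_group:
--                 entity['container_type'] = new_entity_type
--             modification_index += 1
--
--     return entities, result_entities
-- ===== SOURCE B (Python) =====
-- def update_container_types_optimized(entities, result_entities):
--     """Update container types to ensure uniqueness."""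
--     combined = entities[:]
--     if result_entities:
--         combined.append(result_entities[-1])
--
--     # snapshot the original (type, name) of every entity before any relabeling
--     orig = [(e['container_type'], e['container_name']) for e in combined]
--
--     for e, (ct, name) in zip(combined, orig):
--         names = []
--         for t, n in orig:
--             if t == ct and n not in names:
--                 names.append(n)
--         if len(names) > 1 and name != names[0]:
--             e['container_type'] = f"{ct}-{names.index(name) + 1}"
--
--     return entities, result_entities
-- ===== Notes on version B (the rewrite author's own statement) =====
-- stated objective: simpler
-- what changed: Replaces A's three-level grouping (defaultdict type->entities, then per-type defaultdict name->entities, then renumbering loops with a running modification index) by a snapshot of each entity's original (type, name) and one direct pass that rewrites an entity only when its name's first-appearance rank within its type group is positive, computing that rank by a plain scan with no dictionaries at all.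
import Mathlib
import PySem

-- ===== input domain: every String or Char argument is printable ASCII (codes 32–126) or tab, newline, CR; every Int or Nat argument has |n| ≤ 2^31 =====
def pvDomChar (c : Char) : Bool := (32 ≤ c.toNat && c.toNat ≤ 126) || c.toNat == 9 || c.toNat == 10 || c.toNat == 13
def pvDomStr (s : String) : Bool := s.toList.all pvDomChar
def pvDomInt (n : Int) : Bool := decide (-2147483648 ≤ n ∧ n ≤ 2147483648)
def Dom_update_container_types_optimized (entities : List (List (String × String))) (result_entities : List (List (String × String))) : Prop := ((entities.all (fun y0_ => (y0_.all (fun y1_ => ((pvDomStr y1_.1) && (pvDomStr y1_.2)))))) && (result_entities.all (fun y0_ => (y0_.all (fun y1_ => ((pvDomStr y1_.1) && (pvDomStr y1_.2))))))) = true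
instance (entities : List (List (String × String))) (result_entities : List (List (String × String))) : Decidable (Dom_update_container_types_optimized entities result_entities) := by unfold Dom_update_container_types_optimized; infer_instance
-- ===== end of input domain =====

-- B replaces A's nested defaultdict grouping by a snapshot of original (type, name) pairs and one direct
-- relabeling pass (rank = first-appearance index of the name within its type group), with no dictionaries;
-- same return value (A also mutates the shared dicts in place in Python; B performs the same mutations).


-- ===== PORT A =====
-- entity['k'] read (KeyError excluded by Pre_) and entity['k'] = v write, on a Python dict
def pvGet (d : List (String × String)) (k : String) : String := (PySem.Dict.mk d).getD k ""
def pvSet (d : List (String × String)) (k v : String) : List (String × String) := ((PySem.Dict.mk d).insert k v).items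

-- Python mutates shared dict objects in place; the port models each object by its index into `combined`
-- and the mutable heap by the list `st` of current dict values.  `container_name` is read from `combined`
-- (exact: A never writes that key, so the object's current name always equals its original one).
def update_container_types_optimized (entities : List (List (String × String))) (result_entities : List (List (String × String))) : (List (List (String × String))) × (List (List (String × String))) :=
  let combined := entities ++ (if result_entities.isEmpty then [] else [result_entities.getLastD []])
  let groups : PySem.Dict String (List Nat) :=
    combined.zipIdx.foldl (fun d p => d.modify (pvGet p.1 "container_type") [] (· ++ [p.2])) (PySem.Dict.mk [])
  let st := groups.items.foldl (fun st pr =>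
      let nameDict : PySem.Dict String (List Nat) :=
        pr.2.foldl (fun d i => d.modify (pvGet (combined.getD i []) "container_name") [] (· ++ [i])) (PySem.Dict.mk [])
      if nameDict.items.length ≤ 1 then st
      else (nameDict.items.foldl (fun acc pr2 =>
              let newT := if acc.2 = (1 : Int) then pr.1 else pr.1 ++ "-" ++ PySem.Int.toStr acc.2
              (pr2.2.foldl (fun s i => s.set i (pvSet (s.getD i []) "container_type" newT)) acc.1, acc.2 + 1))
            (st, (1 : Int))).1)
    combined
  (st.take entities.length,
   if result_entities.isEmpty then result_entities else result_entities.dropLast ++ [st.getLastD []])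

-- ===== PORT B =====
def update_container_types_optimized_alt (entities : List (List (String × String))) (result_entities : List (List (String × String))) : (List (List (String × String))) × (List (List (String × String))) :=
  let combined := entities ++ (if result_entities.isEmpty then [] else [result_entities.getLastD []])
  let orig := combined.map (fun e => (pvGet e "container_type", pvGet e "container_name"))
  let relabeled := (combined.zip orig).map (fun p =>
      let names := orig.foldl (fun ns q => if q.1 == p.2.1 && !(ns.contains q.2) then ns ++ [q.2] else ns) []
      if decide (1 < names.length) && (p.2.2 != names.headD "") then
        pvSet p.1 "container_type" (p.2.1 ++ "-" ++ PySem.Int.toStr (((PySem.List.index? names p.2.2).getD 0 : Int) + 1))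
      else p.1)
  (relabeled.take entities.length,
   if result_entities.isEmpty then result_entities else result_entities.dropLast ++ [relabeled.getLastD []])

-- ===== PRECONDITION & SPEC =====
def pvOkEntity (d : List (String × String)) : Bool :=
  (PySem.Dict.mk d).contains "container_type" && (PySem.Dict.mk d).contains "container_name"
    && decide (d.map Prod.fst).Nodup

-- Pre_ excludes exactly the entities that enter `combined` (members of entities, or the last of
-- result_entities) on which Python A raises KeyError ('container_type'/'container_name' missing), and the
-- association lists with duplicate keys, which do not represent a Python dict (a Python dict literal
-- collapses duplicates, a defensible representation corner of the dict-as-assoc-list model).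
def Pre_update_container_types_optimized (entities : List (List (String × String))) (result_entities : List (List (String × String))) : Prop :=
  entities.all pvOkEntity = true ∧ (result_entities.isEmpty = false → pvOkEntity (result_entities.getLastD []) = true)
instance (entities : List (List (String × String))) (result_entities : List (List (String × String))) : Decidable (Pre_update_container_types_optimized entities result_entities) := by unfold Pre_update_container_types_optimized; infer_instance

def pvWitness_update_container_types_optimized : (List (List (String × String))) × (List (List (String × String))) :=
  ([[("container_type", "box"), ("container_name", "x")], [("container_type", "box"), ("container_name", "y")]], [])

def Spec_update_container_types_optimized (entities : List (List (String × String))) (result_entities : List (List (String × String))) (out : (List (List (String × String))) × (List (List (String × String)))) : Prop := out = update_container_types_optimized_alt entities result_entities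
instance (entities : List (List (String × String))) (result_entities : List (List (String × String))) (out : (List (List (String × String))) × (List (List (String × String)))) : Decidable (Spec_update_container_types_optimized entities result_entities out) := by unfold Spec_update_container_types_optimized; infer_instance

-- ===== CLAIM (what is proved, stated in full; the proofs are below) =====
def Claim_equal_update_container_types_optimized : Prop := ∀ (entities : List (List (String × String))) (result_entities : List (List (String × String))), Dom_update_container_types_optimized entities result_entities → Pre_update_container_types_optimized entities result_entities → Spec_update_container_types_optimized entities result_entities (update_container_types_optimized entities result_entities)

-- ===== LEMMAS AND PROOFS =====

-- abbreviations for the two fields of an entity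
def pvTy (e : List (String × String)) : String := pvGet e "container_type"
def pvNm (e : List (String × String)) : String := pvGet e "container_name"
-- snapshot of (type, name) pairs (B's `orig`)
def pvOrig (c : List (List (String × String))) : List (String × String) :=
  c.map (fun e => (pvTy e, pvNm e))
-- first-appearance-ordered distinct names within the type group of ct
def pvNames (c : List (List (String × String))) (ct : String) : List String :=
  PySem.Set.ofList (((pvOrig c).filter (fun q => q.1 == ct)).map (fun q => q.2))
-- indices (into c) of the entities whose type is ct, in order
def pvIdxs (c : List (List (String × String))) (ct : String) : List Nat :=
  (c.zipIdx.filter (fun p => pvTy p.1 == ct)).map (fun p => p.2)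
-- the sub-group of those indices carrying name nm
def pvGrp (c : List (List (String × String))) (ct nm : String) : List Nat :=
  (pvIdxs c ct).filter (fun i => pvNm (c.getD i []) == nm)
-- A's new_entity_type for modification index m
def pvMi (ct : String) (m : Int) : String :=
  if m = 1 then ct else ct ++ "-" ++ PySem.Int.toStr m
-- flat list of A's write instructions (index, value) for the group of ct
def pvW (c : List (List (String × String))) (ct : String) : List (Nat × String) :=
  ((pvNames c ct).zipIdx 1).flatMap
    (fun q => (pvGrp c ct q.1).map (fun i => (i, pvMi ct (q.2 : Int))))
-- one in-place write  entity['container_type'] = w.2  at heap position w.1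
def pvWStep (s : List (List (String × String))) (w : Nat × String) : List (List (String × String)) :=
  s.set w.1 (pvSet (s.getD w.1 []) "container_type" w.2)
-- the common per-entity relabeling both programs compute
def pvG (c : List (List (String × String))) (e : List (String × String)) : List (String × String) :=
  if 1 < (pvNames c (pvTy e)).length ∧ pvNm e ≠ (pvNames c (pvTy e)).headD "" then
    pvSet e "container_type"
      (pvTy e ++ "-" ++ PySem.Int.toStr (((PySem.List.index? (pvNames c (pvTy e)) (pvNm e)).getD 0 : Int) + 1))
  else e
-- A's heap after the relabeling loops, as a function of combined
def pvStore (c : List (List (String × String))) : List (List (String × String)) :=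
  (c.zipIdx.foldl (fun d p => d.modify (pvGet p.1 "container_type") [] (· ++ [p.2])) (PySem.Dict.mk [])).items.foldl (fun st pr =>
      let nameDict : PySem.Dict String (List Nat) :=
        pr.2.foldl (fun d i => d.modify (pvGet (c.getD i []) "container_name") [] (· ++ [i])) (PySem.Dict.mk [])
      if nameDict.items.length ≤ 1 then st
      else (nameDict.items.foldl (fun acc pr2 =>
              let newT := if acc.2 = (1 : Int) then pr.1 else pr.1 ++ "-" ++ PySem.Int.toStr acc.2
              (pr2.2.foldl (fun s i => s.set i (pvSet (s.getD i []) "container_type" newT)) acc.1, acc.2 + 1))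
            (st, (1 : Int))).1)
    c
-- B's relabeled list, as a function of combined
def pvRelab (c : List (List (String × String))) : List (List (String × String)) :=
  (c.zip (pvOrig c)).map (fun p =>
      let names := (pvOrig c).foldl (fun ns q => if q.1 == p.2.1 && !(ns.contains q.2) then ns ++ [q.2] else ns) []
      if decide (1 < names.length) && (p.2.2 != names.headD "") then
        pvSet p.1 "container_type" (p.2.1 ++ "-" ++ PySem.Int.toStr (((PySem.List.index? names p.2.2).getD 0 : Int) + 1))
      else p.1)
-- per-type processing step of A's outer loop, in normalized form
def pvGStep (c : List (List (String × String))) (st : List (List (String × String))) (ct : String) :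
    List (List (String × String)) :=
  if (pvNames c ct).length ≤ 1 then st else (pvW c ct).foldl pvWStep st

-- two members of an association list with unique keys and the same key are the same member
theorem pv_keyInj {α β : Type} (l : List (α × β)) (h : (l.map Prod.fst).Nodup)
    {p q : α × β} (hp : p ∈ l) (hq : q ∈ l) (e : p.1 = q.1) : p = q := by
  induction l with
  | nil => cases hp
  | cons a t ih =>
    rw [List.map_cons, List.nodup_cons] at h
    rcases List.mem_cons.mp hp with rfl | hp' <;> rcases List.mem_cons.mp hq with rfl | hq'
    · rfl
    · exact absurd (List.mem_map.mpr ⟨q, hq', e.symm⟩) h.1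
    · exact absurd (List.mem_map.mpr ⟨p, hp', e⟩) h.1
    · exact ih h.2 hp' hq' 

-- overwriting a key of a duplicate-free dict with the value it already has is the identity
theorem pv_pvSet_self (d : List (String × String)) (k v : String)
    (hnd : (d.map Prod.fst).Nodup) (h : (PySem.Dict.mk d).get? k = some v) :
    pvSet d k v = d := by
  obtain ⟨pr, hfind, hv⟩ : ∃ pr, List.find? (fun p => p.1 == k) d = some pr ∧ pr.2 = v := by
    unfold PySem.Dict.get? at h
    cases hf : List.find? (fun p => p.1 == k) d with
    | none => rw [hf] at h; simp at h
    | some pr => rw [hf] at h; exact ⟨pr, rfl, by simpa using h⟩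
  have hprk : pr.1 = k := by have := List.find?_some hfind; simpa using this
  have hprm : pr ∈ d := List.mem_of_find?_eq_some hfind
  have hcont : (PySem.Dict.mk d).contains k = true := by
    unfold PySem.Dict.contains
    exact List.any_eq_true.mpr ⟨pr, hprm, by simpa using hprk⟩
  unfold pvSet PySem.Dict.insert
  rw [if_pos hcont]
  simp only
  have : ∀ q ∈ d, (if (q.1 == k) = true then ((k, v) : String × String) else q) = q := by
    intro q hq
    by_cases hqk : (q.1 == k) = true
    · rw [if_pos hqk]
      have : q = pr := pv_keyInj d hnd hq hprm (by rw [eq_of_beq hqk, hprk])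
      rw [this]
      exact Prod.ext hprk.symm hv.symm
    · rw [if_neg hqk]
  rw [List.map_congr_left this]
  simp

-- B's names loop is the ordered dedup of the names in ct's type group
theorem pv_fold_names (o : List (String × String)) (ct : String) :
    o.foldl (fun ns q => if q.1 == ct && !(ns.contains q.2) then ns ++ [q.2] else ns) [] =
      PySem.Set.ofList ((o.filter (fun q => q.1 == ct)).map (fun q => q.2)) := by
  have aux : ∀ (o : List (String × String)) (s : List String),
      o.foldl (fun ns q => if q.1 == ct && !(ns.contains q.2) then ns ++ [q.2] else ns) s =
        PySem.Set.update s ((o.filter (fun q => q.1 == ct)).map (fun q => q.2)) := by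
    intro o
    induction o with
    | nil => intro s; rfl
    | cons q t ih =>
      intro s
      by_cases hq : (q.1 == ct) = true
      · have hstep : (if q.1 == ct && !(s.contains q.2) then s ++ [q.2] else s) = PySem.Set.add s q.2 := by
          unfold PySem.Set.add
          cases hc : s.contains q.2 <;> simp [hq] <;> simpa using hc
        rw [List.foldl_cons, hstep, ih]
        simp only [List.filter_cons, hq, if_true, List.map_cons]
        rfl
      · have hstep : (if q.1 == ct && !(s.contains q.2) then s ++ [q.2] else s) = s := by simp [hq]
        rw [List.foldl_cons, hstep, ih]
        simp only [List.filter_cons, hq, Bool.false_eq_true, if_false]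
  exact aux o []

theorem pv_zipIdx_map_fst {α γ : Type} (c : List α) (f : α → γ) :
    ∀ k, ((c.zipIdx k).map (fun p => f p.1)) = c.map f := by
  induction c with
  | nil => intro k; rfl
  | cons a t ih => intro k; rw [List.zipIdx_cons, List.map_cons, List.map_cons, ih]

theorem pv_zipIdx_filter_fst {α γ : Type} (c : List α) (q : α → Bool) (f : α → γ) :
    ∀ k, ((c.zipIdx k).filter (fun p => q p.1)).map (fun p => f p.1) = (c.filter q).map f := by
  induction c with
  | nil => intro k; rfl
  | cons a t ih =>
    intro k
    rw [List.zipIdx_cons, List.filter_cons, List.filter_cons]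
    by_cases hq : q a = true
    · simp only [hq, if_pos]
      rw [List.map_cons, List.map_cons, ih]
    · simp only [hq, Bool.false_eq_true, if_false]
      exact ih (k + 1)

theorem pv_zipIdx_getD (c : List (List (String × String))) (p : List (String × String) × Nat)
    (hp : p ∈ c.zipIdx) : c.getD p.2 [] = p.1 ∧ p.2 < c.length := by
  obtain ⟨e, i⟩ := p
  obtain ⟨-, hlt, heq⟩ := List.mem_zipIdx hp
  simp only [Nat.zero_add] at hlt
  simp only [Nat.sub_zero] at heq
  exact ⟨by rw [List.getD_eq_getElem c [] hlt, heq], hlt⟩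

theorem pv_idxs_map {γ : Type} (c : List (List (String × String))) (ct : String)
    (f : List (String × String) → γ) :
    (pvIdxs c ct).map (fun i => f (c.getD i [])) = (c.filter (fun e => pvTy e == ct)).map f := by
  unfold pvIdxs
  rw [List.map_map]
  have h1 : ∀ p ∈ c.zipIdx.filter (fun p => pvTy p.1 == ct),
      ((fun i => f (c.getD i [])) ∘ (fun p => p.2)) p = f p.1 := by
    intro p hp
    have hgd := (pv_zipIdx_getD c p (List.mem_of_mem_filter hp)).1
    show f (c.getD p.2 []) = f p.1
    rw [hgd]
  rw [List.map_congr_left h1]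
  exact pv_zipIdx_filter_fst c (fun e => pvTy e == ct) f 0

theorem pv_mem_idxs (c : List (List (String × String))) (ct : String) (i : Nat) :
    i ∈ pvIdxs c ct ↔ i < c.length ∧ pvTy (c.getD i []) = ct := by
  unfold pvIdxs
  constructor
  · intro hi
    obtain ⟨p, hpf, rfl⟩ := List.mem_map.mp hi
    have hpz := List.mem_of_mem_filter hpf
    have hpred := List.of_mem_filter hpf
    obtain ⟨hgd, hlt⟩ := pv_zipIdx_getD c p hpz
    exact ⟨hlt, by rw [hgd]; exact eq_of_beq hpred⟩
  · rintro ⟨hlt, hty⟩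
    have h1 : i < (c.zipIdx 0).length := by simpa using hlt
    have h2 := List.getElem_zipIdx (l := c) (j := 0) (i := i) h1
    have hz := List.getElem_mem h1
    rw [h2] at hz
    simp only [Nat.zero_add] at hz
    have hgd := List.getD_eq_getElem c [] hlt
    refine List.mem_map.mpr ⟨_, List.mem_filter.mpr ⟨hz, ?_⟩, rfl⟩
    rw [hgd] at hty
    simpa using hty

theorem pv_idxs_nodup (c : List (List (String × String))) (ct : String) : (pvIdxs c ct).Nodup := by
  have h1 : List.Sublist ((c.zipIdx.filter (fun p => pvTy p.1 == ct)).map (fun p => p.2))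
      (c.zipIdx.map (fun p => p.2)) := List.Sublist.map _ List.filter_sublist
  exact (List.nodup_zipIdx_map_snd c).sublist h1

-- the filtered name-group of ct, as B sees it
theorem pv_filter_orig (c : List (List (String × String))) (ct : String) :
    ((pvOrig c).filter (fun q => q.1 == ct)).map (fun q => q.2)
      = (c.filter (fun e => pvTy e == ct)).map pvNm := by
  unfold pvOrig
  rw [List.filter_map, List.map_map]
  rfl

-- A's grouping dict: one item per distinct type, carrying the indices of its entities
theorem pv_groups_items (c : List (List (String × String))) :
    (c.zipIdx.foldl (fun d p => d.modify (pvGet p.1 "container_type") [] (· ++ [p.2])) (PySem.Dict.mk [])).items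
      = (PySem.Set.ofList (c.map pvTy)).map (fun ct => (ct, pvIdxs c ct)) := by
  have hkeys : (c.zipIdx.foldl (fun d p => d.modify (pvGet p.1 "container_type") [] (· ++ [p.2])) (PySem.Dict.mk [])).keys
      = PySem.Set.ofList (c.map pvTy) := by
    have h := PySem.Dict.keys_foldl_modify_key (l := c.zipIdx) (key := fun p => pvTy p.1)
      (d0 := ([] : List Nat)) (f := fun _ p => (· ++ [p.2])) (d := PySem.Dict.mk [])
    rw [pv_zipIdx_map_fst c pvTy 0] at h
    exact h
  have hnd : (c.zipIdx.foldl (fun d p => d.modify (pvGet p.1 "container_type") [] (· ++ [p.2])) (PySem.Dict.mk [])).keys.Nodup :=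
    PySem.Dict.nodup_keys_foldl_modify_key (l := c.zipIdx) (key := fun p => pvTy p.1)
      (d0 := ([] : List Nat)) (f := fun _ p => (· ++ [p.2])) (d := PySem.Dict.mk []) (by simp [PySem.Dict.keys])
  have hgetD : ∀ ct', (c.zipIdx.foldl (fun d p => d.modify (pvGet p.1 "container_type") [] (· ++ [p.2])) (PySem.Dict.mk [])).getD ct' [] = pvIdxs c ct' := by
    intro ct'
    have h1 : (c.zipIdx.foldl (fun d p => d.modify (pvGet p.1 "container_type") [] (· ++ [p.2])) (PySem.Dict.mk []))
        = ((c.zipIdx.map (fun p => (pvTy p.1, p.2))).foldl (fun d (p : String × Nat) => d.modify p.1 [] (· ++ [p.2])) (PySem.Dict.mk [])) := by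
      rw [List.foldl_map]
      rfl
    rw [h1, PySem.Dict.getD_foldl_modify_append, List.filter_map, List.map_map]
    simp only [PySem.Dict.getD, PySem.Dict.get?, List.find?_nil, Option.map_none, Option.getD_none, List.nil_append]
    rfl
  rw [PySem.Dict.items_eq_map_keys _ hnd [], hkeys]
  exact List.map_congr_left (fun ct' _ => by rw [hgetD ct'])

-- A's per-type name dict: one item per distinct name, carrying that name's indices
theorem pv_nameDict_items (c : List (List (String × String))) (ct : String) :
    ((pvIdxs c ct).foldl (fun d i => d.modify (pvGet (c.getD i []) "container_name") [] (· ++ [i])) (PySem.Dict.mk [])).items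
      = (pvNames c ct).map (fun nm => (nm, pvGrp c ct nm)) := by
  have hkeys : ((pvIdxs c ct).foldl (fun d i => d.modify (pvGet (c.getD i []) "container_name") [] (· ++ [i])) (PySem.Dict.mk [])).keys
      = pvNames c ct := by
    have h := PySem.Dict.keys_foldl_modify_key (l := pvIdxs c ct) (key := fun i => pvNm (c.getD i []))
      (d0 := ([] : List Nat)) (f := fun _ i => (· ++ [i])) (d := PySem.Dict.mk [])
    rw [pv_idxs_map c ct pvNm, ← pv_filter_orig c ct] at h
    exact h
  have hnd : ((pvIdxs c ct).foldl (fun d i => d.modify (pvGet (c.getD i []) "container_name") [] (· ++ [i])) (PySem.Dict.mk [])).keys.Nodup :=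
    PySem.Dict.nodup_keys_foldl_modify_key (l := pvIdxs c ct) (key := fun i => pvNm (c.getD i []))
      (d0 := ([] : List Nat)) (f := fun _ i => (· ++ [i])) (d := PySem.Dict.mk []) (by simp [PySem.Dict.keys])
  have hgetD : ∀ nm, ((pvIdxs c ct).foldl (fun d i => d.modify (pvGet (c.getD i []) "container_name") [] (· ++ [i])) (PySem.Dict.mk [])).getD nm [] = pvGrp c ct nm := by
    intro nm
    have h1 : ((pvIdxs c ct).foldl (fun d i => d.modify (pvGet (c.getD i []) "container_name") [] (· ++ [i])) (PySem.Dict.mk []))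
        = (((pvIdxs c ct).map (fun i => (pvNm (c.getD i []), i))).foldl (fun d (p : String × Nat) => d.modify p.1 [] (· ++ [p.2])) (PySem.Dict.mk [])) := by
      rw [List.foldl_map]
      rfl
    rw [h1, PySem.Dict.getD_foldl_modify_append, List.filter_map, List.map_map]
    simp only [PySem.Dict.getD, PySem.Dict.get?, List.find?_nil, Option.map_none, Option.getD_none, List.nil_append]
    have hid : ((fun (x : String × Nat) => x.2) ∘ fun i => (pvNm (c.getD i []), i)) = id := rfl
    rw [hid, List.map_id]
    rfl
  rw [PySem.Dict.items_eq_map_keys _ hnd [], hkeys]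
  exact List.map_congr_left (fun nm _ => by rw [hgetD nm])

-- a fold threading a counter is a fold over zipIdx
theorem pv_counter_fold {σ ρ : Type} (F : σ → Int → ρ → σ) (ps : List ρ) :
    ∀ (k : Nat) (s0 : σ),
      (ps.foldl (fun acc pr2 => (F acc.1 acc.2 pr2, acc.2 + 1)) (s0, (k : Int))).1
        = (ps.zipIdx k).foldl (fun s q => F s (q.2 : Int) q.1) s0 := by
  induction ps with
  | nil => intro k s0; rfl
  | cons a t ih =>
    intro k s0
    have hcast : ((k : Int) + 1) = ((k + 1 : Nat) : Int) := by push_cast; ring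
    simp only [List.foldl_cons, List.zipIdx_cons]
    rw [hcast]
    exact ih (k + 1) (F s0 (k : Int) a)

-- a contained key is looked up as its pvGet value
theorem pv_get?_eq (d : List (String × String)) (k : String)
    (h : (PySem.Dict.mk d).contains k = true) :
    (PySem.Dict.mk d).get? k = some (pvGet d k) := by
  unfold PySem.Dict.contains at h
  obtain ⟨p, hp, hpk⟩ := List.any_eq_true.mp h
  unfold pvGet PySem.Dict.getD
  cases hf : (PySem.Dict.mk d).get? k with
  | none =>
    exfalso
    unfold PySem.Dict.get? at hf
    rw [Option.map_eq_none_iff] at hf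
    exact (List.find?_eq_none.mp hf p hp) hpk
  | some v => simp

-- A's processing of one type group is the flat write list pvW, applied in order
theorem pv_groupstep (c : List (List (String × String))) (ct : String)
    (st : List (List (String × String))) :
    (let nameDict : PySem.Dict String (List Nat) :=
        (pvIdxs c ct).foldl (fun d i => d.modify (pvGet (c.getD i []) "container_name") [] (· ++ [i])) (PySem.Dict.mk [])
     if nameDict.items.length ≤ 1 then st
     else (nameDict.items.foldl (fun acc pr2 =>
              let newT := if acc.2 = (1 : Int) then ct else ct ++ "-" ++ PySem.Int.toStr acc.2
              (pr2.2.foldl (fun s i => s.set i (pvSet (s.getD i []) "container_type" newT)) acc.1, acc.2 + 1))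
            (st, (1 : Int))).1)
      = pvGStep c st ct := by
  have hitems := pv_nameDict_items c ct
  show (if ((pvIdxs c ct).foldl (fun d i => d.modify (pvGet (c.getD i []) "container_name") [] (· ++ [i])) (PySem.Dict.mk [])).items.length ≤ 1 then st else ((((pvIdxs c ct).foldl (fun d i => d.modify (pvGet (c.getD i []) "container_name") [] (· ++ [i])) (PySem.Dict.mk [])).items.foldl (fun acc pr2 => ((pr2.2.foldl (fun s i => s.set i (pvSet (s.getD i []) "container_type" (if acc.2 = (1 : Int) then ct else ct ++ "-" ++ PySem.Int.toStr acc.2))) acc.1), acc.2 + 1)) (st, (1 : Int))).1)) = pvGStep c st ct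
  rw [hitems, List.length_map]
  unfold pvGStep
  by_cases hle : (pvNames c ct).length ≤ 1
  · rw [if_pos hle, if_pos hle]
  · rw [if_neg hle, if_neg hle, List.foldl_map]
    have hcf := pv_counter_fold
      (F := fun s (m : Int) (nm : String) => (pvGrp c ct nm).foldl
        (fun s i => s.set i (pvSet (s.getD i []) "container_type" (pvMi ct m))) s)
      (pvNames c ct) 1 st
    refine hcf.trans ?_
    unfold pvW
    rw [List.foldl_flatMap]
    have hfun2 : (fun (s : List (List (String × String))) (q : String × Nat) =>
        ((pvGrp c ct q.1).map (fun i => (i, pvMi ct (q.2 : Int)))).foldl pvWStep s)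
        = fun (s : List (List (String × String))) (q : String × Nat) =>
            (pvGrp c ct q.1).foldl (fun s i => s.set i (pvSet (s.getD i []) "container_type" (pvMi ct (q.2 : Int)))) s := by
      funext s q
      rw [List.foldl_map]
      rfl
    rw [hfun2]

theorem pv_getD_set_ne (s : List (List (String × String))) (i j : Nat) (x : List (String × String))
    (h : i ≠ j) : (s.set i x).getD j [] = s.getD j [] := by
  by_cases hj : j < s.length
  · rw [List.getD_eq_getElem _ _ (by simpa using hj), List.getD_eq_getElem _ _ hj]
    exact List.getElem_set_ne h _
  · have hle := Nat.le_of_not_lt hj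
    simp [List.getD, List.getElem?_eq_none hle,
      List.getElem?_eq_none (show (s.set i x).length ≤ j by simpa using hle)]

theorem pv_index_mem (l : List String) (a : String) (h : a ∈ l) :
    ∃ k, PySem.List.index? l a = some k ∧ k < l.length ∧ l.getD k "" = a := by
  induction l with
  | nil => cases h
  | cons b t ih =>
    by_cases hb : (b == a) = true
    · exact ⟨0, by simp [PySem.List.index?, List.idxOf?_cons, hb], by simp, by simpa using (eq_of_beq hb)⟩
    · have hat : a ∈ t := by
        rcases List.mem_cons.mp h with rfl | h'
        · exact absurd (by simp) hb
        · exact h'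
      obtain ⟨k, h1, h2, h3⟩ := ih hat
      unfold PySem.List.index? at h1 ⊢
      refine ⟨k + 1, ?_, by simpa using h2, by simpa using h3⟩
      simp [List.idxOf?_cons, hb, h1]

theorem pv_index_head (l : List String) (hl : l ≠ []) :
    PySem.List.index? l (l.headD "") = some 0 := by
  cases l with
  | nil => exact absurd rfl hl
  | cons b t => simp [PySem.List.index?, List.idxOf?_cons]

theorem pv_wfold_length (W : List (Nat × String)) (s : List (List (String × String))) :
    (W.foldl pvWStep s).length = s.length := by
  induction W generalizing s with
  | nil => rfl
  | cons w t ih =>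
    rw [List.foldl_cons, ih]
    simp [pvWStep]

theorem pv_wfold_notmem (W : List (Nat × String)) (s : List (List (String × String))) (j : Nat)
    (h : ∀ w ∈ W, w.1 ≠ j) : (W.foldl pvWStep s).getD j [] = s.getD j [] := by
  induction W generalizing s with
  | nil => rfl
  | cons w t ih =>
    rw [List.foldl_cons, ih _ (fun v hv => h v (List.mem_cons_of_mem _ hv))]
    exact pv_getD_set_ne s w.1 j _ (h w (by simp))

theorem pv_wfold_mem (W : List (Nat × String)) (s : List (List (String × String))) (j : Nat) (v : String)
    (hnd : (W.map Prod.fst).Nodup) (hmem : (j, v) ∈ W) (hj : j < s.length) :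
    (W.foldl pvWStep s).getD j [] = pvSet (s.getD j []) "container_type" v := by
  induction W generalizing s with
  | nil => cases hmem
  | cons w t ih =>
    rw [List.map_cons, List.nodup_cons] at hnd
    rcases List.mem_cons.mp hmem with heq | hmem'
    · obtain rfl := heq.symm
      rw [List.foldl_cons]
      have hnot : ∀ u ∈ t, u.1 ≠ j := by
        intro u hu he
        exact hnd.1 (he ▸ List.mem_map.mpr ⟨u, hu, rfl⟩)
      rw [pv_wfold_notmem t _ j hnot]
      show (s.set j _).getD j [] = _
      rw [List.getD_eq_getElem _ _ (by simpa using hj)]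
      exact List.getElem_set_self _
    · have hne : w.1 ≠ j := by
        intro he
        exact hnd.1 (List.mem_map.mpr ⟨(j, v), hmem', by rw [he]⟩)
      rw [List.foldl_cons, ih _ hnd.2 hmem' (by simpa [pvWStep, List.length_set] using hj)]
      show pvSet ((s.set w.1 _).getD j []) _ _ = _
      rw [pv_getD_set_ne s w.1 j _ hne]

theorem pv_nodup_flatMap {α β : Type} (l : List α) (f : α → List β)
    (h1 : ∀ a ∈ l, (f a).Nodup)
    (h2 : ∀ a ∈ l, ∀ b ∈ l, a ≠ b → ∀ x ∈ f a, x ∉ f b) (hl : l.Nodup) :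
    (l.flatMap f).Nodup := by
  induction l with
  | nil => simp
  | cons a t ih =>
    rw [List.nodup_cons] at hl
    rw [List.flatMap_cons, List.nodup_append]
    refine ⟨h1 a (by simp), ih (fun b hb => h1 b (by simp [hb]))
      (fun b hb b' hb' hne => h2 b (by simp [hb]) b' (by simp [hb']) hne) hl.2, ?_⟩
    intro x hx y hy hEq
    obtain ⟨b, hb, hyb⟩ := List.mem_flatMap.mp hy
    have hab : a ≠ b := fun he => hl.1 (he ▸ hb)
    exact h2 a (by simp) b (by simp [hb]) hab x hx (hEq ▸ hyb)

theorem pv_pvW_fst (c : List (List (String × String))) (ct : String) (w : Nat × String)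
    (hw : w ∈ pvW c ct) : w.1 < c.length ∧ pvTy (c.getD w.1 []) = ct := by
  unfold pvW at hw
  obtain ⟨q, hq, hw2⟩ := List.mem_flatMap.mp hw
  obtain ⟨i, hi, rfl⟩ := List.mem_map.mp hw2
  unfold pvGrp at hi
  exact (pv_mem_idxs c ct i).mp (List.mem_of_mem_filter hi)

theorem pv_pvW_nodup (c : List (List (String × String))) (ct : String) :
    ((pvW c ct).map Prod.fst).Nodup := by
  have hnmnd : (pvNames c ct).Nodup := PySem.Set.nodup_ofList _
  have hznd : (((pvNames c ct).zipIdx 1).map Prod.fst).Nodup := by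
    rw [pv_zipIdx_map_fst (pvNames c ct) (fun x => x) 1]
    simpa using hnmnd
  unfold pvW
  rw [List.map_flatMap]
  have hfun : (fun (q : String × Nat) => ((pvGrp c ct q.1).map (fun i => (i, pvMi ct (q.2 : Int)))).map Prod.fst)
      = fun (q : String × Nat) => pvGrp c ct q.1 := by
    funext q
    rw [List.map_map]
    have hid : (Prod.fst ∘ fun i : Nat => (i, pvMi ct (q.2 : Int))) = id := rfl
    rw [hid, List.map_id]
  rw [hfun]
  apply pv_nodup_flatMap
  · intro q _
    exact (pv_idxs_nodup c ct).filter _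
  · intro q hq q' hq' hne x hx hx'
    unfold pvGrp at hx hx'
    have e1 := eq_of_beq (List.mem_filter.mp hx).2
    have e2 := eq_of_beq (List.mem_filter.mp hx').2
    exact hne (pv_keyInj ((pvNames c ct).zipIdx 1) hznd hq hq' (by rw [← e1, ← e2]))
  · exact List.Nodup.of_map Prod.fst hznd

theorem pv_pvW_mem (c : List (List (String × String))) (ct : String) (j : Nat)
    (hj : j < c.length) (hty : pvTy (c.getD j []) = ct) :
    ∃ k, PySem.List.index? (pvNames c ct) (pvNm (c.getD j [])) = some k ∧
      (j, pvMi ct ((k + 1 : Nat) : Int)) ∈ pvW c ct := by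
  have hjidx : j ∈ pvIdxs c ct := (pv_mem_idxs c ct j).mpr ⟨hj, hty⟩
  have hmemc : c.getD j [] ∈ c := by
    rw [List.getD_eq_getElem c [] hj]
    exact List.getElem_mem hj
  have hnmmem : pvNm (c.getD j []) ∈ pvNames c ct := by
    unfold pvNames
    apply (PySem.Set.mem_ofList _ _).mpr
    rw [pv_filter_orig c ct]
    refine List.mem_map.mpr ⟨c.getD j [], List.mem_filter.mpr ⟨hmemc, ?_⟩, rfl⟩
    show (pvTy (c.getD j []) == ct) = true
    rw [hty]
    simp
  obtain ⟨k, hk1, hk2, hk3⟩ := pv_index_mem (pvNames c ct) _ hnmmem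
  refine ⟨k, hk1, ?_⟩
  unfold pvW
  apply List.mem_flatMap.mpr
  refine ⟨((pvNames c ct).getD k "", k + 1), ?_, ?_⟩
  · have hlen : k < ((pvNames c ct).zipIdx 1).length := by simpa using hk2
    have hgz := List.getElem_zipIdx (l := pvNames c ct) (j := 1) (i := k) hlen
    have hm := List.getElem_mem hlen
    rw [hgz] at hm
    have hgd := List.getD_eq_getElem (pvNames c ct) "" hk2
    rw [← hgd, Nat.add_comm 1 k] at hm
    exact hm
  · apply List.mem_map.mpr
    refine ⟨j, ?_, rfl⟩
    unfold pvGrp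
    exact List.mem_filter.mpr ⟨hjidx, by rw [hk3]; simp⟩

theorem pv_gstep_length (c : List (List (String × String))) (st : List (List (String × String)))
    (ct : String) : (pvGStep c st ct).length = st.length := by
  unfold pvGStep
  by_cases h : (pvNames c ct).length ≤ 1
  · rw [if_pos h]
  · rw [if_neg h]
    exact pv_wfold_length _ _

theorem pv_gstep_other (c : List (List (String × String))) (st : List (List (String × String)))
    (ct : String) (j : Nat) (hty : pvTy (c.getD j []) ≠ ct) :
    (pvGStep c st ct).getD j [] = st.getD j [] := by
  unfold pvGStep
  by_cases h : (pvNames c ct).length ≤ 1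
  · rw [if_pos h]
  · rw [if_neg h]
    exact pv_wfold_notmem _ _ _ (fun w hw he => hty (he ▸ (pv_pvW_fst c ct w hw).2))

theorem pv_gstep_self (c : List (List (String × String))) (st : List (List (String × String)))
    (ct : String) (j : Nat) (hj : j < c.length) (hst : j < st.length)
    (hty : pvTy (c.getD j []) = ct) :
    (pvGStep c st ct).getD j [] =
      if 1 < (pvNames c ct).length then
        pvSet (st.getD j []) "container_type"
          (pvMi ct (((PySem.List.index? (pvNames c ct) (pvNm (c.getD j []))).getD 0 + 1 : Nat) : Int))
      else st.getD j [] := by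
  unfold pvGStep
  by_cases h : (pvNames c ct).length ≤ 1
  · rw [if_pos h, if_neg (by omega)]
  · rw [if_neg h, if_pos (by omega)]
    obtain ⟨k, hk1, hkmem⟩ := pv_pvW_mem c ct j hj hty
    rw [pv_wfold_mem (pvW c ct) st j _ (pv_pvW_nodup c ct) hkmem hst, hk1]
    rfl

theorem pv_fold_gstep_length (c : List (List (String × String))) (Ts : List String) :
    ∀ st, (Ts.foldl (pvGStep c) st).length = st.length := by
  induction Ts with
  | nil => intro st; rfl
  | cons ct tl ih =>
    intro st
    rw [List.foldl_cons, ih]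
    exact pv_gstep_length c st ct

theorem pv_outer (c : List (List (String × String))) (Ts : List String) (hnd : Ts.Nodup) :
    ∀ st, st.length = c.length → ∀ j, j < c.length →
      (Ts.foldl (pvGStep c) st).getD j [] =
        if pvTy (c.getD j []) ∈ Ts ∧ 1 < (pvNames c (pvTy (c.getD j []))).length then
          pvSet (st.getD j []) "container_type"
            (pvMi (pvTy (c.getD j []))
              (((PySem.List.index? (pvNames c (pvTy (c.getD j []))) (pvNm (c.getD j []))).getD 0 + 1 : Nat) : Int))
        else st.getD j [] := by
  induction Ts with
  | nil => intro st hlen j hj; simp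
  | cons ct Ts' ih =>
    intro st hlen j hj
    have hnd' := List.nodup_cons.mp hnd
    rw [List.foldl_cons]
    by_cases hty : pvTy (c.getD j []) = ct
    · have hnotin : pvTy (c.getD j []) ∉ Ts' := by rw [hty]; exact hnd'.1
      rw [ih hnd'.2 (pvGStep c st ct) (by rw [pv_gstep_length]; exact hlen) j hj,
        if_neg (by intro hcon; exact hnotin hcon.1),
        pv_gstep_self c st ct j hj (by omega) hty, ← hty]
      have hmem : pvTy (c.getD j []) ∈ pvTy (c.getD j []) :: Ts' := by simp
      by_cases hlt : 1 < (pvNames c (pvTy (c.getD j []))).length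
      · rw [if_pos hlt, if_pos ⟨hmem, hlt⟩]
      · rw [if_neg hlt, if_neg (fun hcon => hlt hcon.2)]
    · rw [ih hnd'.2 (pvGStep c st ct) (by rw [pv_gstep_length]; exact hlen) j hj,
        pv_gstep_other c st ct j hty]
      by_cases hmem : pvTy (c.getD j []) ∈ Ts' ∧ 1 < (pvNames c (pvTy (c.getD j []))).length
      · rw [if_pos hmem, if_pos ⟨List.mem_cons_of_mem _ hmem.1, hmem.2⟩]
      · rw [if_neg hmem, if_neg (fun hcon => hmem ⟨(List.mem_cons.mp hcon.1).resolve_left hty, hcon.2⟩)]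

theorem pv_store_eq (c : List (List (String × String))) (hc : ∀ e ∈ c, pvOkEntity e = true) :
    pvStore c = c.map (pvG c) := by
  unfold pvStore
  rw [pv_groups_items c]
  rw [PySem.List.foldl_congr_mem _ _ (fun st (pr : String × List Nat) => pvGStep c st pr.1) c
    (by
      intro st pr hpr
      obtain ⟨ct, hctmem, rfl⟩ := List.mem_map.mp hpr
      exact pv_groupstep c ct st)]
  rw [List.foldl_map]
  show ((PySem.Set.ofList (c.map pvTy)).foldl (pvGStep c) c) = c.map (pvG c)
  apply List.ext_getElem
  · rw [List.length_map]
    exact pv_fold_gstep_length c _ c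
  · intro j h1 h2
    have hj : j < c.length := by simpa using h2
    have hmemc : c.getD j [] ∈ c := by
      rw [List.getD_eq_getElem c [] hj]
      exact List.getElem_mem hj
    rw [← List.getD_eq_getElem _ ([] : List (String × String)) h1,
      pv_outer c _ (PySem.Set.nodup_ofList _) c rfl j hj, List.getElem_map,
      ← List.getD_eq_getElem c [] hj]
    have hmemT : pvTy (c.getD j []) ∈ PySem.Set.ofList (c.map pvTy) := by
      apply (PySem.Set.mem_ofList _ _).mpr
      exact List.mem_map.mpr ⟨c.getD j [], hmemc, rfl⟩
    have hok := hc (c.getD j []) hmemc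
    unfold pvOkEntity at hok
    rw [Bool.and_eq_true, Bool.and_eq_true] at hok
    obtain ⟨⟨hct, hcn⟩, hknd⟩ := hok
    have hknd' : ((c.getD j []).map Prod.fst).Nodup := of_decide_eq_true hknd
    unfold pvG
    by_cases hlt : 1 < (pvNames c (pvTy (c.getD j []))).length
    · rw [if_pos ⟨hmemT, hlt⟩]
      have hnmmem : pvNm (c.getD j []) ∈ pvNames c (pvTy (c.getD j [])) := by
        unfold pvNames
        apply (PySem.Set.mem_ofList _ _).mpr
        rw [pv_filter_orig c _]
        exact List.mem_map.mpr ⟨c.getD j [], List.mem_filter.mpr ⟨hmemc, by simp⟩, rfl⟩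
      obtain ⟨k, hk1, hk2, hk3⟩ := pv_index_mem _ _ hnmmem
      rw [hk1]
      simp only [Option.getD_some]
      have hnn : pvNames c (pvTy (c.getD j [])) ≠ [] := List.ne_nil_of_length_pos (by omega)
      have hhead : (pvNames c (pvTy (c.getD j []))).headD "" = (pvNames c (pvTy (c.getD j []))).getD 0 "" := by
        obtain ⟨b, tl, hbt⟩ := List.exists_cons_of_ne_nil hnn
        rw [hbt]
        rfl
      by_cases hk0 : k = 0
      · subst hk0
        rw [if_neg (by
          intro hcon
          exact hcon.2 (by rw [hhead, ← hk3]))]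
        have hmi : pvMi (pvTy (c.getD j [])) ((0 + 1 : Nat) : Int) = pvTy (c.getD j []) := by
          simp [pvMi]
        rw [hmi]
        exact pv_pvSet_self _ _ _ hknd' (pv_get?_eq _ _ hct)
      · have hne : pvNm (c.getD j []) ≠ (pvNames c (pvTy (c.getD j []))).headD "" := by
          intro he
          have h0 := pv_index_head _ hnn
          rw [← he, hk1] at h0
          exact hk0 (Option.some.inj h0)
        rw [if_pos ⟨hlt, hne⟩]
        have hval : pvMi (pvTy (c.getD j [])) ((k + 1 : Nat) : Int)
            = pvTy (c.getD j []) ++ "-" ++ PySem.Int.toStr ((k : Int) + 1) := by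
          unfold pvMi
          rw [if_neg (by push_cast; omega)]
          norm_cast
        rw [hval]
    · rw [if_neg (fun hcon => hlt hcon.2), if_neg (fun hcon => hlt hcon.1)]

theorem pv_relab_eq (c : List (List (String × String))) :
    pvRelab c = c.map (pvG c) := by
  have hbody : ∀ (p : (List (String × String)) × (String × String)), p.2 = (pvTy p.1, pvNm p.1) →
      (fun (p : (List (String × String)) × (String × String)) =>
        if decide (1 < ((pvOrig c).foldl (fun ns q => if q.1 == p.2.1 && !(ns.contains q.2) then ns ++ [q.2] else ns) []).length)
            && (p.2.2 != ((pvOrig c).foldl (fun ns q => if q.1 == p.2.1 && !(ns.contains q.2) then ns ++ [q.2] else ns) []).headD "") then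
          pvSet p.1 "container_type" (p.2.1 ++ "-" ++ PySem.Int.toStr (((PySem.List.index? ((pvOrig c).foldl (fun ns q => if q.1 == p.2.1 && !(ns.contains q.2) then ns ++ [q.2] else ns) []) p.2.2).getD 0 : Int) + 1))
        else p.1) p = pvG c p.1 := by
    rintro ⟨e, pr⟩ hpr
    simp only at hpr
    subst hpr
    simp only
    rw [pv_fold_names (pvOrig c) (pvTy e)]
    have hPN : PySem.Set.ofList (((pvOrig c).filter (fun q => q.1 == pvTy e)).map (fun q => q.2)) = pvNames c (pvTy e) := rfl
    rw [hPN]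
    unfold pvG
    by_cases hcond : 1 < (pvNames c (pvTy e)).length ∧ pvNm e ≠ (pvNames c (pvTy e)).headD ""
    · rw [if_pos hcond]
      have hb : (decide (1 < (pvNames c (pvTy e)).length)
          && (pvNm e != (pvNames c (pvTy e)).headD "")) = true := by
        rw [Bool.and_eq_true, decide_eq_true_eq, bne_iff_ne]
        exact ⟨hcond.1, hcond.2⟩
      rw [if_pos hb]
    · rw [if_neg hcond]
      have hb : (decide (1 < (pvNames c (pvTy e)).length)
          && (pvNm e != (pvNames c (pvTy e)).headD "")) = false := by
        apply Bool.eq_false_iff.mpr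
        intro hcontra
        rw [Bool.and_eq_true, decide_eq_true_eq, bne_iff_ne] at hcontra
        exact hcond ⟨hcontra.1, hcontra.2⟩
      rw [hb]
      simp
  unfold pvRelab
  apply List.ext_getElem
  · simp [pvOrig]
  · intro j h1 h2
    rw [List.getElem_map, List.getElem_zip, List.getElem_map]
    have hjc : j < c.length := by simpa using h2
    have horig : (pvOrig c)[j]'(by simpa [pvOrig] using hjc) = (pvTy (c.getD j []), pvNm (c.getD j [])) := by
      unfold pvOrig
      rw [List.getElem_map]
      rw [← List.getD_eq_getElem c [] hjc]
    have := hbody ((c.getD j []), (pvTy (c.getD j []), pvNm (c.getD j []))) rfl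
    rw [← List.getD_eq_getElem c [] hjc, horig]
    exact this

-- ===== VERDICT (by name: the statement is the Claim_ definition above) =====
theorem update_container_types_optimized_spec : Claim_equal_update_container_types_optimized := by
  intro entities result_entities _hdom hpre
  unfold Spec_update_container_types_optimized
  set c : List (List (String × String)) :=
    entities ++ (if result_entities.isEmpty then [] else [result_entities.getLastD []]) with hcdef
  have hA : update_container_types_optimized entities result_entities =
      ((pvStore c).take entities.length,
        if result_entities.isEmpty then result_entities
        else result_entities.dropLast ++ [(pvStore c).getLastD []]) := rfl
  have hB : update_container_types_optimized_alt entities result_entities =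
      ((pvRelab c).take entities.length,
        if result_entities.isEmpty then result_entities
        else result_entities.dropLast ++ [(pvRelab c).getLastD []]) := rfl
  have hc : ∀ e ∈ c, pvOkEntity e = true := by
    intro e he
    rcases List.mem_append.mp he with h | h
    · exact List.all_eq_true.mp hpre.1 e h
    · by_cases hre : result_entities.isEmpty
      · simp [hre] at h
      · simp only [if_neg hre] at h
        rcases List.mem_singleton.mp h with rfl
        exact hpre.2 (by simpa using hre)
  rw [hA, hB, pv_store_eq c hc, pv_relab_eq c]
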